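-- pv_equiv track=rewrite | github.com/jplexer/cloudpebble | cloudpebble/ide/utils/alloy_templates.py | _ordered_paths
-- ===== SOURCE A (Python) =====
-- WATCHFACE_TUTORIAL_PREFIX = 'watchface-tutorial'
--
-- WATCHFACE_TUTORIAL_PARTS = [
--     ('part1', 'Your First Watchface'),
--     ('part2', 'Customizing Your Watchface'),
--     ('part3', 'Adding Battery and Bluetooth'),
--     ('part4', 'Adding Weather'),
--     ('part5', 'Adding User Settings'),
-- ]
--
-- def _ordered_paths(paths):
--     unique_paths = []
--     seen = set()
--     for item in paths:
--         if item not in seen: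
--             seen.add(item)
--             unique_paths.append(item)
--
--     def _remainder_key(value):
--         return value.lower()
--
--     tutorial = [p for p in unique_paths if p.startswith(WATCHFACE_TUTORIAL_PREFIX + '/')]
--     tutorial_order = [WATCHFACE_TUTORIAL_PREFIX + '/' + slug for slug, _ in WATCHFACE_TUTORIAL_PARTS]
--     tutorial_rank = {path: idx for idx, path in enumerate(tutorial_order)}
--     tutorial = sorted(tutorial, key=lambda p: tutorial_rank.get(p, 9999))
--
--     watchfaces = sorted([p for p in unique_paths if p.startswith('piu/watchfaces/')], key=_remainder_key)
--     apps = sorted([p for p in unique_paths if p.startswith('piu/apps/')], key=_remainder_key)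
--
--     consumed = set(tutorial + watchfaces + apps)
--     remainder = sorted([p for p in unique_paths if p not in consumed], key=_remainder_key)
--     return tutorial + watchfaces + apps + remainder
-- ===== SOURCE B (Python) =====
-- WATCHFACE_TUTORIAL_PREFIX = 'watchface-tutorial'
--
-- WATCHFACE_TUTORIAL_PARTS = [
--     ('part1', 'Your First Watchface'),
--     ('part2', 'Customizing Your Watchface'),
--     ('part3', 'Adding Battery and Bluetooth'),
--     ('part4', 'Adding Weather'),
--     ('part5', 'Adding User Settings'),
-- ]
--
-- def _ordered_paths(paths):
--     tut_prefix = WATCHFACE_TUTORIAL_PREFIX + '/'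
--     tutorial, watchfaces, apps, remainder = [], [], [], []
--     seen = set()
--     for p in paths:
--         if p in seen:
--             continue
--         seen.add(p)
--         if p.startswith(tut_prefix):
--             tutorial.append(p)
--         elif p.startswith('piu/watchfaces/'):
--             watchfaces.append(p)
--         elif p.startswith('piu/apps/'):
--             apps.append(p)
--         else:
--             remainder.append(p)
--     rank = {tut_prefix + slug: idx for idx, (slug, _) in enumerate(WATCHFACE_TUTORIAL_PARTS)}
--     tutorial.sort(key=lambda p: rank.get(p, 9999))
--     watchfaces.sort(key=str.lower)
--     apps.sort(key=str.lower)
--     remainder.sort(key=str.lower)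
--     return tutorial + watchfaces + apps + remainder
-- ===== Notes on version B (the rewrite author's own statement) =====
-- stated objective: simpler
-- what changed: Replaces A's four separate filter scans over the deduped list plus the consumed-set subtraction with a single bucketing pass (if/elif chain into four lists, no consumed set), followed by the same per-bucket sorts.
import Mathlib
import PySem

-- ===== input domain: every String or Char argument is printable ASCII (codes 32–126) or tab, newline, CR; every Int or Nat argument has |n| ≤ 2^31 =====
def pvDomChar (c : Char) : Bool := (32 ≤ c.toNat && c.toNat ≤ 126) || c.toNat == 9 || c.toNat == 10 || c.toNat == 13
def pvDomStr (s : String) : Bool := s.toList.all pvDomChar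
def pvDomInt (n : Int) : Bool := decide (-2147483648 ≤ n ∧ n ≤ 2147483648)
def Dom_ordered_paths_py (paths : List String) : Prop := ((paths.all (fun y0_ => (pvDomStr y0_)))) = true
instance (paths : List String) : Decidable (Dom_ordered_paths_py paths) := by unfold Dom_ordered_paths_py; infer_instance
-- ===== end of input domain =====

-- B replaces A's four separate filter scans plus consumed-set subtraction by one bucketing pass
-- (an if/elif chain into four lists) followed by the same sorts: simpler, one traversal, no consumed set.

-- WATCHFACE_TUTORIAL_PREFIX
def pvWfPrefix : String := "watchface-tutorial"

-- WATCHFACE_TUTORIAL_PARTS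
def pvWfParts : List (String × String) :=
  [("part1", "Your First Watchface"),
   ("part2", "Customizing Your Watchface"),
   ("part3", "Adding Battery and Bluetooth"),
   ("part4", "Adding Weather"),
   ("part5", "Adding User Settings")]

-- ===== PORT A =====
def ordered_paths_py (paths : List String) : List String :=
  -- dedup loop: seen (a Python set) and unique_paths, appended in tandem
  let st := paths.foldl
    (fun (st : PySem.Set String × List String) item =>
      if PySem.Set.contains st.1 item then st
      else (PySem.Set.add st.1 item, st.2 ++ [item]))
    (PySem.Set.empty, [])
  let uniquePaths := st.2
  -- WATCHFACE_TUTORIAL_PREFIX + '/'  (string concatenation ported via PySem.Str.join)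
  let tutPrefix := PySem.Str.join "" [pvWfPrefix, "/"]
  let tutorial := uniquePaths.filter (fun p => PySem.Str.startswith p tutPrefix)
  let tutorialOrder := pvWfParts.map (fun pr => PySem.Str.join "" [pvWfPrefix, "/", pr.1])
  let tutorialRank := (PySem.List.enumerate tutorialOrder).foldl
    (fun (d : PySem.Dict String Int) iv => d.insert iv.2 iv.1) PySem.Dict.empty
  let tutorialSorted := PySem.List.sorted tutorial (fun p => tutorialRank.getD p 9999) false
  let watchfaces := PySem.List.sorted
    (uniquePaths.filter (fun p => PySem.Str.startswith p "piu/watchfaces/"))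
    (fun p => PySem.Str.lower p) false
  let apps := PySem.List.sorted
    (uniquePaths.filter (fun p => PySem.Str.startswith p "piu/apps/"))
    (fun p => PySem.Str.lower p) false
  let consumed := PySem.Set.ofList (tutorialSorted ++ watchfaces ++ apps)
  let remainder := PySem.List.sorted
    (uniquePaths.filter (fun p => !(PySem.Set.contains consumed p)))
    (fun p => PySem.Str.lower p) false
  tutorialSorted ++ watchfaces ++ apps ++ remainder

-- ===== PORT B =====
def ordered_paths_py_alt (paths : List String) : List String :=
  let tutPrefix := PySem.Str.join "" [pvWfPrefix, "/"]
  -- single bucketing pass: state = (seen, tutorial, watchfaces, apps, remainder)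
  let st := paths.foldl
    (fun (st : PySem.Set String × List String × List String × List String × List String) p =>
      if PySem.Set.contains st.1 p then st
      else
        let seen := PySem.Set.add st.1 p
        if PySem.Str.startswith p tutPrefix then
          (seen, st.2.1 ++ [p], st.2.2.1, st.2.2.2.1, st.2.2.2.2)
        else if PySem.Str.startswith p "piu/watchfaces/" then
          (seen, st.2.1, st.2.2.1 ++ [p], st.2.2.2.1, st.2.2.2.2)
        else if PySem.Str.startswith p "piu/apps/" then
          (seen, st.2.1, st.2.2.1, st.2.2.2.1 ++ [p], st.2.2.2.2)
        else
          (seen, st.2.1, st.2.2.1, st.2.2.2.1, st.2.2.2.2 ++ [p]))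
    (PySem.Set.empty, [], [], [], [])
  let rank := (PySem.List.enumerate (pvWfParts.map
      (fun pr => PySem.Str.join "" [pvWfPrefix, "/", pr.1]))).foldl
    (fun (d : PySem.Dict String Int) iv => d.insert iv.2 iv.1) PySem.Dict.empty
  PySem.List.sorted st.2.1 (fun p => rank.getD p 9999) false
    ++ PySem.List.sorted st.2.2.1 (fun p => PySem.Str.lower p) false
    ++ PySem.List.sorted st.2.2.2.1 (fun p => PySem.Str.lower p) false
    ++ PySem.List.sorted st.2.2.2.2 (fun p => PySem.Str.lower p) false

-- ===== PRECONDITION & SPEC =====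
def Spec_ordered_paths_py (paths : List String) (out : List String) : Prop := out = ordered_paths_py_alt paths
instance (paths : List String) (out : List String) : Decidable (Spec_ordered_paths_py paths out) := by unfold Spec_ordered_paths_py; infer_instance

-- ===== CLAIM (what is proved, stated in full; the proofs are below) =====
def Claim_equal_ordered_paths_py : Prop := ∀ (paths : List String), Dom_ordered_paths_py paths → Spec_ordered_paths_py paths (ordered_paths_py paths)

-- ===== LEMMAS AND PROOFS =====

-- the first occurrences of elements of `l` that are not already in `s`
def pvFresh (s : PySem.Set String) : List String → List String
  | [] => []
  | x :: xs => if PySem.Set.contains s x then pvFresh s xs else x :: pvFresh (PySem.Set.add s x) xs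

-- A's dedup loop: `seen` becomes `update s l` and `pvFresh s l` is appended to the accumulator
theorem pv_afold (l : List String) : ∀ (s : PySem.Set String) (acc : List String),
    l.foldl (fun (st : PySem.Set String × List String) item =>
      if PySem.Set.contains st.1 item then st
      else (PySem.Set.add st.1 item, st.2 ++ [item])) (s, acc)
    = (PySem.Set.update s l, acc ++ pvFresh s l) := by
  induction l with
  | nil => intro s acc; simp [pvFresh, PySem.Set.update]
  | cons x xs ih =>
    intro s acc
    have hupd : PySem.Set.update s (x :: xs) = PySem.Set.update (PySem.Set.add s x) xs := rfl
    rw [List.foldl_cons, hupd]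
    by_cases h : PySem.Set.contains s x
    · have hx : x ∈ s := List.contains_iff_mem.mp h
      have hadd : PySem.Set.add s x = s := by simp [PySem.Set.add, hx]
      have hfr : pvFresh s (x :: xs) = pvFresh s xs := by simp [pvFresh, hx]
      simp only [h, if_true, ih, hadd, hfr]
    · have hx : x ∉ s := by simpa [List.contains_iff_mem] using h
      have hfr : pvFresh s (x :: xs) = x :: pvFresh (PySem.Set.add s x) xs := by
        simp [pvFresh, hx]
      simp only [h, if_false, Bool.false_eq_true, ih, hfr]
      simp

-- B's bucketing loop appends, to each bucket, the matching slice of `pvFresh s l`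
theorem pv_bfold (l : List String) : ∀ (s : PySem.Set String) (t w a r : List String),
    l.foldl (fun (st : PySem.Set String × List String × List String × List String × List String) p =>
      if PySem.Set.contains st.1 p then st
      else
        let seen := PySem.Set.add st.1 p
        if PySem.Str.startswith p (PySem.Str.join "" [pvWfPrefix, "/"]) then
          (seen, st.2.1 ++ [p], st.2.2.1, st.2.2.2.1, st.2.2.2.2)
        else if PySem.Str.startswith p "piu/watchfaces/" then
          (seen, st.2.1, st.2.2.1 ++ [p], st.2.2.2.1, st.2.2.2.2)
        else if PySem.Str.startswith p "piu/apps/" then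
          (seen, st.2.1, st.2.2.1, st.2.2.2.1 ++ [p], st.2.2.2.2)
        else
          (seen, st.2.1, st.2.2.1, st.2.2.2.1, st.2.2.2.2 ++ [p])) (s, t, w, a, r)
    = (PySem.Set.update s l,
       t ++ (pvFresh s l).filter (fun p => PySem.Str.startswith p (PySem.Str.join "" [pvWfPrefix, "/"])),
       w ++ (pvFresh s l).filter (fun p => !PySem.Str.startswith p (PySem.Str.join "" [pvWfPrefix, "/"])
              && PySem.Str.startswith p "piu/watchfaces/"),
       a ++ (pvFresh s l).filter (fun p => !PySem.Str.startswith p (PySem.Str.join "" [pvWfPrefix, "/"])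
              && !PySem.Str.startswith p "piu/watchfaces/" && PySem.Str.startswith p "piu/apps/"),
       r ++ (pvFresh s l).filter (fun p => !PySem.Str.startswith p (PySem.Str.join "" [pvWfPrefix, "/"])
              && !PySem.Str.startswith p "piu/watchfaces/" && !PySem.Str.startswith p "piu/apps/")) := by
  induction l with
  | nil => intro s t w a r; simp [pvFresh, PySem.Set.update]
  | cons x xs ih =>
    intro s t w a r
    have hupd : PySem.Set.update s (x :: xs) = PySem.Set.update (PySem.Set.add s x) xs := rfl
    rw [List.foldl_cons, hupd]
    by_cases h : PySem.Set.contains s x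
    · have hx : x ∈ s := List.contains_iff_mem.mp h
      have hadd : PySem.Set.add s x = s := by simp [PySem.Set.add, hx]
      have hfr : pvFresh s (x :: xs) = pvFresh s xs := by simp [pvFresh, hx]
      simp only [h, if_true, ih, hadd, hfr]
    · have hx : x ∉ s := by simpa [List.contains_iff_mem] using h
      have hfr : pvFresh s (x :: xs) = x :: pvFresh (PySem.Set.add s x) xs := by
        simp [pvFresh, hx]
      simp only [h, if_false, Bool.false_eq_true, hfr]
      by_cases h1 : PySem.Str.startswith x (PySem.Str.join "" [pvWfPrefix, "/"]) <;>
        by_cases h2 : PySem.Str.startswith x "piu/watchfaces/" <;>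
          by_cases h3 : PySem.Str.startswith x "piu/apps/" <;>
            simp only [h1, h2, h3, if_true, if_false, Bool.false_eq_true, ih,
              List.filter_cons, Bool.not_true, Bool.not_false, Bool.true_and,
              Bool.false_and, Bool.and_true, Bool.and_false, Bool.and_self] <;>
              simp

-- two incomparable prefixes cannot both start the same string
theorem pv_excl {q1 q2 : String} (hq : ¬ (q1.toList <+: q2.toList ∨ q2.toList <+: q1.toList))
    (p : String) (h1 : PySem.Str.startswith p q1 = true) :
    PySem.Str.startswith p q2 = false := by
  by_contra h2
  rw [Bool.not_eq_false] at h2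
  simp only [PySem.Str.startswith] at h1 h2
  exact hq (List.prefix_or_prefix_of_prefix
    ((PySem.Chars.startswith_iff _ _).mp h1) ((PySem.Chars.startswith_iff _ _).mp h2))

theorem pv_join_eq : PySem.Str.join "" [pvWfPrefix, "/"] = "watchface-tutorial/" := by decide

-- ===== VERDICT (by name: the statement is the Claim_ definition above) =====
theorem ordered_paths_py_spec : Claim_equal_ordered_paths_py := by
  intro paths _
  unfold Spec_ordered_paths_py
  simp only [ordered_paths_py, ordered_paths_py_alt]
  rw [pv_afold, pv_bfold]
  simp only [List.nil_append]
  set u := pvFresh PySem.Set.empty paths with hu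
  have eTW : ∀ p : String, PySem.Str.startswith p (PySem.Str.join "" [pvWfPrefix, "/"]) = true →
      PySem.Str.startswith p "piu/watchfaces/" = false := by
    rw [pv_join_eq]; exact pv_excl (by decide)
  have eTA : ∀ p : String, PySem.Str.startswith p (PySem.Str.join "" [pvWfPrefix, "/"]) = true →
      PySem.Str.startswith p "piu/apps/" = false := by
    rw [pv_join_eq]; exact pv_excl (by decide)
  have eWA : ∀ p : String, PySem.Str.startswith p "piu/watchfaces/" = true →
      PySem.Str.startswith p "piu/apps/" = false :=
    pv_excl (by decide)
  -- remainder: on u, "not consumed" is exactly "matched none of the three prefixes"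
  have hR : u.filter (fun p => !(PySem.Set.contains (PySem.Set.ofList
        (PySem.List.sorted (u.filter (fun p => PySem.Str.startswith p (PySem.Str.join "" [pvWfPrefix, "/"])))
           (fun p => ((PySem.List.enumerate (pvWfParts.map (fun pr => PySem.Str.join "" [pvWfPrefix, "/", pr.1]))).foldl
              (fun (d : PySem.Dict String Int) iv => d.insert iv.2 iv.1) PySem.Dict.empty).getD p 9999) false
         ++ PySem.List.sorted (u.filter (fun p => PySem.Str.startswith p "piu/watchfaces/")) (fun p => PySem.Str.lower p) false
         ++ PySem.List.sorted (u.filter (fun p => PySem.Str.startswith p "piu/apps/")) (fun p => PySem.Str.lower p) false)) p))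
      = u.filter (fun p => !PySem.Str.startswith p (PySem.Str.join "" [pvWfPrefix, "/"])
          && !PySem.Str.startswith p "piu/watchfaces/" && !PySem.Str.startswith p "piu/apps/") := by
    refine List.filter_congr (fun p hp => ?_)
    rw [Bool.eq_iff_iff]
    simp only [Bool.not_eq_eq_eq_not, Bool.not_true, Bool.and_eq_true, Bool.not_eq_true',
      Bool.not_eq_true, PySem.Set.contains, List.contains_iff_mem, PySem.Set.mem_ofList,
      List.mem_append, PySem.List.mem_sorted, List.mem_filter, hp, true_and, decide_eq_false_iff_not]
    cases hb1 : PySem.Str.startswith p (PySem.Str.join "" [pvWfPrefix, "/"]) <;>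
      cases hb2 : PySem.Str.startswith p "piu/watchfaces/" <;>
        cases hb3 : PySem.Str.startswith p "piu/apps/" <;>
          simp_all [PySem.Str.startswith]
  -- watchfaces: A's plain filter equals B's elif-chain filter
  have hW : u.filter (fun p => PySem.Str.startswith p "piu/watchfaces/")
      = u.filter (fun p => !PySem.Str.startswith p (PySem.Str.join "" [pvWfPrefix, "/"])
          && PySem.Str.startswith p "piu/watchfaces/") := by
    refine List.filter_congr (fun p _ => ?_)
    cases h2 : PySem.Str.startswith p "piu/watchfaces/"
    · simp
    · have h1 : PySem.Str.startswith p (PySem.Str.join "" [pvWfPrefix, "/"]) = false := by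
        cases h1 : PySem.Str.startswith p (PySem.Str.join "" [pvWfPrefix, "/"])
        · rfl
        · exact Bool.noConfusion ((eTW p h1).symm.trans h2)
      rw [h1]; decide
  -- apps: same for the third branch
  have hA : u.filter (fun p => PySem.Str.startswith p "piu/apps/")
      = u.filter (fun p => !PySem.Str.startswith p (PySem.Str.join "" [pvWfPrefix, "/"])
          && !PySem.Str.startswith p "piu/watchfaces/" && PySem.Str.startswith p "piu/apps/") := by
    refine List.filter_congr (fun p _ => ?_)
    cases h3 : PySem.Str.startswith p "piu/apps/"
    · simp
    · have h1 : PySem.Str.startswith p (PySem.Str.join "" [pvWfPrefix, "/"]) = false := by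
        cases h1 : PySem.Str.startswith p (PySem.Str.join "" [pvWfPrefix, "/"])
        · rfl
        · exact Bool.noConfusion ((eTA p h1).symm.trans h3)
      have h2 : PySem.Str.startswith p "piu/watchfaces/" = false := by
        cases h2 : PySem.Str.startswith p "piu/watchfaces/"
        · rfl
        · exact Bool.noConfusion ((eWA p h2).symm.trans h3)
      rw [h1, h2]; decide
  rw [hR, hW, hA]
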